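-- pv_equiv track=rewrite | github.com/coolplayagent/relay-teams | src/agent_teams_evals/workspace/patch_filter.py | _split_patch_blocks
-- ===== SOURCE A (Python) =====
-- def _split_patch_blocks(patch: str) -> list[str]:
--     if not patch:
--         return []
--
--     blocks: list[str] = []
--     current: list[str] = []
--     for line in patch.splitlines(keepends=True):
--         if line.startswith("diff --git "):
--             if current:
--                 blocks.append("".join(current))
--             current = [line]
--             continue
--         if current:
--             current.append(line)
--     if current:
--         blocks.append("".join(current))
--     if blocks:
--         return blocks
--     return [patch]
-- ===== SOURCE B (Python) =====
-- def _split_patch_blocks(patch: str) -> list[str]: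
--     if not patch:
--         return []
--     lines = patch.splitlines(keepends=True)
--     starts = [i for i, line in enumerate(lines) if line.startswith("diff --git ")]
--     if not starts:
--         return [patch]
--     return ["".join(lines[s:e]) for s, e in zip(starts, starts[1:] + [len(lines)])]
-- ===== Notes on version B (the rewrite author's own statement) =====
-- stated objective: alternative
-- what changed: B works in two staged passes over the split lines — first collecting the indices of the 'diff --git ' header lines, then slicing the line list between consecutive boundary indices and joining each slice — instead of A's single forward scan that maintains a pending current-block list and flushes it at each boundary and after the loop.
import Mathlib
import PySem

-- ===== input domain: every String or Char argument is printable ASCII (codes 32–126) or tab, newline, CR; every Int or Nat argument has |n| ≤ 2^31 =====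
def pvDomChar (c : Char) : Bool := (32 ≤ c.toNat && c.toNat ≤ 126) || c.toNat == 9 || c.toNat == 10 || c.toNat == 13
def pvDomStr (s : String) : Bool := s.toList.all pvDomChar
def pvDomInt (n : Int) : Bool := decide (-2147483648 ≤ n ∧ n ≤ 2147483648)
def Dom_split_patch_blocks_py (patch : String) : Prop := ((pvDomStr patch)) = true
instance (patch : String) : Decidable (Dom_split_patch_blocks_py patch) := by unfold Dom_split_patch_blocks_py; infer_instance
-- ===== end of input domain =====

-- B replaces A's single forward scan with its pending current-block accumulator by two staged
-- passes: collect the indices of the 'diff --git ' header lines, then slice the line list between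
-- consecutive indices and join each slice. Objective: alternative decomposition (same cost), provably equal.

-- ===== PORT A =====
-- splitlines(keepends=True), hand-ported character by character: exact on the task's domain
-- (printable ASCII + tab/'\n'/'\r'), where the only line breaks Python recognises are '\n', '\r\n', '\r'.
def pvSplitKeep (acc : List Char) (s : List Char) : List (List Char) :=
  match s with
  | [] => if acc = [] then [] else [acc.reverse]
  | c :: rest =>
    if c = '\n' then (acc.reverse ++ ['\n']) :: pvSplitKeep [] rest
    else if c = '\r' then
      match rest with
      | '\n' :: rest' => (acc.reverse ++ ['\r', '\n']) :: pvSplitKeep [] rest'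
      | [] => (acc.reverse ++ ['\r']) :: pvSplitKeep [] []
      | c' :: rest' => (acc.reverse ++ ['\r']) :: pvSplitKeep [] (c' :: rest')
    else pvSplitKeep (c :: acc) rest
termination_by s.length
decreasing_by all_goals simp <;> omega

-- line.startswith("diff --git ")
def pvIsDiffLine (l : List Char) : Bool := PySem.Chars.startswith l "diff --git ".toList

-- loop body of A: state = (blocks, current)
def pvStepA (st : List (List Char) × List (List Char)) (line : List Char) :
    List (List Char) × List (List Char) :=
  if pvIsDiffLine line then
    ((if st.2 ≠ [] then st.1 ++ [PySem.Chars.join [] st.2] else st.1), [line])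
  else
    (st.1, if st.2 ≠ [] then st.2 ++ [line] else st.2)

def split_patch_blocks_py (patch : String) : List String :=
  if patch.toList = [] then []
  else
    let st := (pvSplitKeep [] patch.toList).foldl pvStepA ([], [])
    let blocks := if st.2 ≠ [] then st.1 ++ [PySem.Chars.join [] st.2] else st.1
    if blocks ≠ [] then blocks.map String.ofList else [patch]

-- ===== PORT B =====
-- B's splitlines(keepends=True), ported as Source B's library call but by a different recursion than
-- A's: measure the first line (breaks '\n', '\r\n', '\r'), cut it off, recurse. Exact on the same
-- domain as pvSplitKeep (printable ASCII + tab/'\n'/'\r').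
def pvLineLen : List Char → Nat
  | [] => 0
  | c :: rest =>
    if c = '\n' then 1
    else if c = '\r' then (if rest.head? = some '\n' then 2 else 1)
    else 1 + pvLineLen rest

lemma pvLineLen_pos (s : List Char) (h : s ≠ []) : 0 < pvLineLen s := by
  match s with
  | c :: rest =>
    simp only [pvLineLen]
    split_ifs <;> omega

def pvLinesB (s : List Char) : List (List Char) :=
  if h : s = [] then []
  else (s.take (pvLineLen s)) :: pvLinesB (s.drop (pvLineLen s))
termination_by s.length
decreasing_by
  simp only [List.length_drop]
  have h1 := pvLineLen_pos s h
  have h2 : 0 < s.length := List.length_pos_iff.mpr h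
  omega

def split_patch_blocks_py_alt (patch : String) : List String :=
  if patch.toList = [] then []
  else
    let lines := pvLinesB patch.toList
    let starts := (PySem.List.enumerate lines 0).filterMap
      (fun p => if PySem.Chars.startswith p.2 "diff --git ".toList then some p.1 else none)
    if starts = [] then [patch]
    else
      (starts.zip (starts.tail ++ [(lines.length : Int)])).map
        (fun se => String.ofList
          (PySem.Chars.join [] (PySem.List.slice lines (some se.1) (some se.2))))

-- ===== PRECONDITION & SPEC =====
def Spec_split_patch_blocks_py (patch : String) (out : List String) : Prop := out = split_patch_blocks_py_alt patch
instance (patch : String) (out : List String) : Decidable (Spec_split_patch_blocks_py patch out) := by unfold Spec_split_patch_blocks_py; infer_instance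

-- ===== CLAIM (what is proved, stated in full; the proofs are below) =====
def Claim_equal_split_patch_blocks_py : Prop := ∀ (patch : String), Dom_split_patch_blocks_py patch → Spec_split_patch_blocks_py patch (split_patch_blocks_py patch)

-- ===== LEMMAS AND PROOFS =====

-- the two splitlines ports agree
lemma pvSplitKeep_eq (acc s : List Char) :
    pvSplitKeep acc s =
      if s = [] then (if acc = [] then [] else [acc.reverse])
      else (acc.reverse ++ s.take (pvLineLen s)) :: pvSplitKeep [] (s.drop (pvLineLen s)) := by
  induction acc, s using pvSplitKeep.induct with
  | case1 => rw [pvSplitKeep.eq_def]; simp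
  | case2 acc h => rw [pvSplitKeep.eq_def]; simp [h]
  | case3 acc rest ih => rw [pvSplitKeep.eq_def]; simp [pvLineLen]
  | case4 acc rest' h ih => rw [pvSplitKeep.eq_def]; simp [pvLineLen]
  | case5 acc h ih => rw [pvSplitKeep.eq_def]; simp [pvLineLen]
  | case6 acc c' rest' hne h ih =>
    rw [pvSplitKeep.eq_def]
    have hne' : c' ≠ '\n' := fun hh => hne hh
    simp [pvLineLen, hne']
  | case7 acc c rest hn hr ih =>
    rw [pvSplitKeep.eq_def]
    simp only [hn, hr, if_false, ite_false]
    rw [ih]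
    have hl : pvLineLen (c :: rest) = 1 + pvLineLen rest := by
      rw [pvLineLen]; simp [hn, hr]
    by_cases hrest : rest = []
    · subst hrest
      have hk : pvSplitKeep [] [] = ([] : List (List Char)) := by
        rw [pvSplitKeep.eq_def]; simp
      simp [pvLineLen, hn, hr, hk]
    · simp [hrest, hl, List.append_assoc, Nat.add_comm 1 (pvLineLen rest),
        List.take_succ_cons, List.drop_succ_cons]

lemma pvLinesB_eq (s : List Char) : pvLinesB s = pvSplitKeep [] s := by
  induction s using pvLinesB.induct with
  | case1 => simp [pvLinesB, pvSplitKeep]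
  | case2 s h ih =>
    rw [pvLinesB, pvSplitKeep_eq]
    simp [h, ih]

-- reference characterisation of the per-file blocks of a line list
def pvBlocks : List (List Char) → List (List Char)
  | [] => []
  | l :: ls =>
    if pvIsDiffLine l then
      (l ++ (ls.takeWhile (fun x => !pvIsDiffLine x)).flatten) ::
        pvBlocks (ls.dropWhile (fun x => !pvIsDiffLine x))
    else pvBlocks ls
termination_by ls => ls.length
decreasing_by
  · exact Nat.lt_succ_of_le (List.length_dropWhile_le _ _)
  · simp

lemma pvJoin_nil_flatten (cs : List (List Char)) : PySem.Chars.join [] cs = cs.flatten := by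
  induction cs with
  | nil => rfl
  | cons c cs ih => cases cs <;> simp_all [PySem.Chars.join, List.intercalate, List.intersperse]

lemma pvBlocks_dropWhile (ls : List (List Char)) :
    pvBlocks (ls.dropWhile (fun x => !pvIsDiffLine x)) = pvBlocks ls := by
  induction ls with
  | nil => rfl
  | cons l ls ih =>
    by_cases h : pvIsDiffLine l
    · simp [h]
    · have h' : pvIsDiffLine l = false := eq_false_of_ne_true h
      simp [h', ih, pvBlocks]

-- === A side: the fold computes pvBlocks ===
def pvFlush (st : List (List Char) × List (List Char)) : List (List Char) :=
  if st.2 ≠ [] then st.1 ++ [PySem.Chars.join [] st.2] else st.1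

lemma pvFoldA_nonempty (lines : List (List Char)) :
    ∀ blocks cur, cur ≠ [] →
    pvFlush (lines.foldl pvStepA (blocks, cur)) =
      blocks ++ [cur.flatten ++ (lines.takeWhile (fun x => !pvIsDiffLine x)).flatten] ++
        pvBlocks (lines.dropWhile (fun x => !pvIsDiffLine x)) := by
  induction lines with
  | nil =>
    intro blocks cur hc
    simp [pvFlush, hc, pvJoin_nil_flatten, pvBlocks]
  | cons l ls ih =>
    intro blocks cur hc
    by_cases h : pvIsDiffLine l
    · simp only [List.foldl_cons, pvStepA, h, if_pos, hc, ne_eq, not_true_eq_false,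
        not_false_eq_true, ite_true]
      rw [ih _ [l] (by simp)]
      simp [pvJoin_nil_flatten, List.takeWhile_cons, List.dropWhile_cons, h, pvBlocks,
        pvBlocks_dropWhile]
    · have h' : pvIsDiffLine l = false := eq_false_of_ne_true h
      simp only [List.foldl_cons, pvStepA, h', hc, ne_eq, not_false_eq_true, ite_true,
        Bool.false_eq_true, ite_false]
      rw [ih _ (cur ++ [l]) (by simp)]
      simp [List.takeWhile_cons, List.dropWhile_cons, h', List.flatten_append,
        List.append_assoc]

lemma pvFoldA_empty (lines : List (List Char)) :
    ∀ blocks, pvFlush (lines.foldl pvStepA (blocks, [])) = blocks ++ pvBlocks lines := by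
  induction lines with
  | nil => intro blocks; simp [pvFlush, pvBlocks]
  | cons l ls ih =>
    intro blocks
    by_cases h : pvIsDiffLine l
    · simp only [List.foldl_cons, pvStepA, h, if_pos, ne_eq, not_true_eq_false, ite_false,
        reduceIte]
      rw [pvFoldA_nonempty ls _ [l] (by simp)]
      simp [pvBlocks, h]
    · have h' : pvIsDiffLine l = false := eq_false_of_ne_true h
      simp only [List.foldl_cons, pvStepA, h', Bool.false_eq_true, ite_false, ne_eq,
        not_true_eq_false, reduceIte]
      rw [ih]
      simp [pvBlocks, h']

-- === B side: indices-then-slices computes pvBlocks ===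

-- B's enumerate/filterMap pass, as a recursion carrying the running index
def pvStarts' (s : Int) : List (List Char) → List Int
  | [] => []
  | l :: ls => if pvIsDiffLine l then s :: pvStarts' (s + 1) ls else pvStarts' (s + 1) ls

lemma pvStarts'_eq (ls : List (List Char)) : ∀ s : Int,
    (PySem.List.enumerate ls s).filterMap
      (fun p => if PySem.Chars.startswith p.2 "diff --git ".toList then some p.1 else none) =
      pvStarts' s ls := by
  induction ls with
  | nil => intro s; simp [PySem.List.enumerate_nil, pvStarts']
  | cons l ls ih =>
    intro s
    rw [PySem.List.enumerate_cons]
    by_cases h : pvIsDiffLine l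
    · have h2 : PySem.Chars.startswith l ['d','i','f','f',' ','-','-','g','i','t',' '] = true := by
        simpa [pvIsDiffLine] using h
      simp [List.filterMap_cons, h2, pvStarts', pvIsDiffLine, h]
      simpa using ih (s + 1)
    · have h2 : PySem.Chars.startswith l ['d','i','f','f',' ','-','-','g','i','t',' '] = false := by
        simpa [pvIsDiffLine] using eq_false_of_ne_true h
      have h' : pvIsDiffLine l = false := eq_false_of_ne_true h
      simp [List.filterMap_cons, h2, pvStarts', pvIsDiffLine, h']
      simpa using ih (s + 1)

-- Nat-valued reference version of the index list
def pvStartsN : List (List Char) → List Nat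
  | [] => []
  | l :: ls =>
    if pvIsDiffLine l then 0 :: (pvStartsN ls).map (· + 1) else (pvStartsN ls).map (· + 1)

lemma pvStarts'_add (ls : List (List Char)) : ∀ s t : Int,
    pvStarts' (s + t) ls = (pvStarts' s ls).map (· + t) := by
  induction ls with
  | nil => intro s t; simp [pvStarts']
  | cons l ls ih =>
    intro s t
    by_cases h : pvIsDiffLine l
    · simp only [pvStarts', h, ite_true, List.map_cons]
      rw [show s + t + 1 = (s + 1) + t by ring, ih]
    · simp only [pvStarts', h, Bool.false_eq_true, ite_false]
      rw [show s + t + 1 = (s + 1) + t by ring, ih]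

lemma pvStarts'_natCast (ls : List (List Char)) :
    pvStarts' 0 ls = (pvStartsN ls).map (fun n : Nat => (n : Int)) := by
  induction ls with
  | nil => simp [pvStarts', pvStartsN]
  | cons l ls ih =>
    have h1 : pvStarts' (1 : Int) ls = (pvStarts' 0 ls).map (· + 1) := by
      have := pvStarts'_add ls 0 1; simpa using this
    have h2 : (pvStarts' 0 ls).map (· + 1) =
        ((pvStartsN ls).map (· + 1)).map (fun n : Nat => (n : Int)) := by
      rw [ih, List.map_map, List.map_map]
      exact List.map_congr_left (fun n _ => by simp)
    by_cases h : pvIsDiffLine l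
    · simp only [pvStarts', pvStartsN, h, ite_true, List.map_cons, zero_add, h1, h2,
        Nat.cast_zero]
    · simp only [pvStarts', pvStartsN, h, Bool.false_eq_true, ite_false, zero_add, h1, h2]

def pvSliceAt (lines : List (List Char)) (se : Nat × Nat) : List Char :=
  ((lines.drop se.1).take (se.2 - se.1)).flatten

def pvPairs (S : List Nat) (n : Nat) : List (Nat × Nat) := S.zip (S.tail ++ [n])

lemma pvShift (l : List Char) (ls : List (List Char)) (S E : List Nat) :
    ((S.map (· + 1)).zip (E.map (· + 1))).map (pvSliceAt (l :: ls)) =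
      (S.zip E).map (pvSliceAt ls) := by
  rw [List.zip_map, List.map_map]
  exact List.map_congr_left (fun p _ => by
    simp [pvSliceAt, Nat.succ_sub_succ])

lemma pvStartsN_nil (ls : List (List Char)) (h : pvStartsN ls = []) :
    ls.takeWhile (fun x => !pvIsDiffLine x) = ls ∧
      ls.dropWhile (fun x => !pvIsDiffLine x) = [] := by
  induction ls with
  | nil => simp
  | cons l ls ih =>
    by_cases hd : pvIsDiffLine l
    · simp [pvStartsN, hd] at h
    · have hd' : pvIsDiffLine l = false := eq_false_of_ne_true hd
      simp only [pvStartsN, hd', Bool.false_eq_true, ite_false, List.map_eq_nil_iff] at h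
      obtain ⟨h1, h2⟩ := ih h
      simp [List.takeWhile_cons, List.dropWhile_cons, hd', h1, h2]

lemma pvStartsN_head (ls : List (List Char)) : ∀ s0 S', pvStartsN ls = s0 :: S' →
    ls.take s0 = ls.takeWhile (fun x => !pvIsDiffLine x) := by
  induction ls with
  | nil => intro s0 S' h; simp [pvStartsN] at h
  | cons l ls ih =>
    intro s0 S' h
    by_cases hd : pvIsDiffLine l
    · simp only [pvStartsN, hd, ite_true, List.cons.injEq] at h
      simp [← h.1, List.takeWhile_cons, hd]
    · have hd' : pvIsDiffLine l = false := eq_false_of_ne_true hd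
      simp only [pvStartsN, hd', Bool.false_eq_true, ite_false] at h
      cases hS : pvStartsN ls with
      | nil => rw [hS] at h; simp at h
      | cons a rest =>
        rw [hS] at h
        simp only [List.map_cons, List.cons.injEq] at h
        rw [← h.1]
        simp [List.takeWhile_cons, hd', ih a rest hS]

lemma pvSlices_eq_blocks (lines : List (List Char)) :
    (pvPairs (pvStartsN lines) lines.length).map (pvSliceAt lines) = pvBlocks lines := by
  induction lines with
  | nil => simp [pvPairs, pvStartsN, pvBlocks]
  | cons l ls ih =>
    by_cases hd : pvIsDiffLine l
    · have hblocks : pvBlocks (l :: ls) =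
          (l ++ (ls.takeWhile (fun x => !pvIsDiffLine x)).flatten) :: pvBlocks ls := by
        rw [pvBlocks]
        simp [hd, pvBlocks_dropWhile]
      simp only [pvStartsN, hd, ite_true]
      cases hS : pvStartsN ls with
      | nil =>
        have hnil := pvStartsN_nil ls hS
        simp only [hS, List.map_nil, pvPairs, List.tail_cons, List.nil_append,
          List.length_cons, List.zip_cons_cons, List.zip_nil_left, List.map_cons, List.map_nil]
        rw [hblocks]
        have hblocks0 : pvBlocks ls = [] := by
          rw [← pvBlocks_dropWhile ls, hnil.2, pvBlocks]
        simp [pvSliceAt, hnil.1, hblocks0, List.take_of_length_le]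
      | cons s0 S' =>
        have htake := pvStartsN_head ls s0 S' hS
        have hshift := pvShift l ls (s0 :: S') (S' ++ [ls.length])
        rw [hS] at ih
        simp only [pvPairs, List.tail_cons] at ih
        simp only [List.map_cons, List.map_append, List.map_nil] at hshift
        simp only [hS, pvPairs, List.map_cons, List.tail_cons, List.length_cons,
          List.cons_append, List.zip_cons_cons, List.map_cons]
        rw [hblocks]
        congr 1
        · simp [pvSliceAt, List.take_succ_cons, htake]
        · rw [hshift, ih]
    · have hd' : pvIsDiffLine l = false := eq_false_of_ne_true hd
      simp only [pvStartsN, hd', Bool.false_eq_true, ite_false]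
      have h2 : (((pvStartsN ls).map (· + 1)).tail ++ [(l :: ls).length]) =
          ((pvStartsN ls).tail ++ [ls.length]).map (· + 1) := by
        simp [List.map_tail, List.length_cons]
      rw [pvPairs, h2, pvShift]
      rw [show pvBlocks (l :: ls) = pvBlocks ls by rw [pvBlocks]; simp [hd']]
      exact ih

lemma pvStartsN_nil_iff (L : List (List Char)) : pvStartsN L = [] ↔ pvBlocks L = [] := by
  constructor
  · intro h
    rw [← pvSlices_eq_blocks, h]
    simp [pvPairs]
  · intro h
    cases hS : pvStartsN L with
    | nil => rfl
    | cons s0 S' =>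
      exfalso
      have := pvSlices_eq_blocks L
      rw [hS, h] at this
      simp [pvPairs] at this

-- the Int-level slice expression of B, lowered to the Nat level
lemma pvIntSlices (L : List (List Char)) :
    ((((pvStartsN L).map (fun n : Nat => (n : Int))).zip
        (((pvStartsN L).map (fun n : Nat => (n : Int))).tail ++ [(L.length : Int)])).map
      (fun se => String.ofList
        (PySem.Chars.join [] (PySem.List.slice L (some se.1) (some se.2))))) =
      ((pvPairs (pvStartsN L) L.length).map (pvSliceAt L)).map String.ofList := by
  have h1 : (((pvStartsN L).map (fun n : Nat => (n : Int))).tail ++ [(L.length : Int)]) =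
      ((pvStartsN L).tail ++ [L.length]).map (fun n : Nat => (n : Int)) := by
    simp [List.map_tail]
  rw [h1, List.zip_map, List.map_map, pvPairs, List.map_map]
  exact List.map_congr_left (fun p _ => by
    simp [Function.comp, PySem.List.slice_natCast, pvJoin_nil_flatten, pvSliceAt])

-- ===== VERDICT (by name: the statement is the Claim_ definition above) =====
theorem split_patch_blocks_py_spec : Claim_equal_split_patch_blocks_py := by
  intro patch _
  unfold Spec_split_patch_blocks_py split_patch_blocks_py split_patch_blocks_py_alt
  by_cases he : patch.toList = []
  · simp [he]
  · simp only [he, ite_false, reduceIte]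
    have hlines : pvLinesB patch.toList = pvSplitKeep [] patch.toList := pvLinesB_eq _
    have hA := pvFoldA_empty (pvSplitKeep [] patch.toList) []
    simp only [List.nil_append] at hA
    unfold pvFlush at hA
    rw [hA, hlines, pvStarts'_eq, pvStarts'_natCast, pvIntSlices, pvSlices_eq_blocks]
    by_cases hb : pvBlocks (pvSplitKeep [] patch.toList) = []
    · have hs : pvStartsN (pvSplitKeep [] patch.toList) = [] :=
        (pvStartsN_nil_iff _).mpr hb
      simp [hb, hs]
    · have hs : pvStartsN (pvSplitKeep [] patch.toList) ≠ [] :=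
        fun h => hb ((pvStartsN_nil_iff _).mp h)
      simp [hb, hs]
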